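-- pv_equiv track=rewrite | github.com/SrGrace/InterviewBit | Heaps And Maps/ProfitMaximisation.py | solve
-- ===== SOURCE A (Python) =====
-- def solve(A, B):
--     import heapq
--     max_heap = [-a for a in A]
--     heapq.heapify(max_heap)
--
--     profit = 0
--     for _ in range(B):
--         # get max seat
--         max_seat = -heapq.heappop(max_heap)
--
--         # add to profit
--         profit += max_seat
--
--         # decrease max seat
--         if max_seat - 1 > 0:
--             heapq.heappush(max_heap, -(max_seat-1))
--
--     return profit
-- ===== SOURCE B (Python) =====
-- def _cnt(pos, t):
--     # number of picks of value >= t available from the positive seats (t >= 1)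
--     return sum(a - t + 1 for a in pos if a >= t)
--
--
-- def solve(A, B):
--     if B <= 0:
--         return 0
--     pos = [a for a in A if a > 0]
--     P = sum(pos)
--     if B <= P:
--         # largest threshold t >= 1 with at least B picks of value >= t
--         lo, hi = 1, max(pos)
--         while lo < hi:
--             mid = (lo + hi + 1) // 2
--             if _cnt(pos, mid) >= B:
--                 lo = mid
--             else:
--                 hi = mid - 1
--         t = lo
--         c = sum(a - t for a in pos if a > t)
--         s = sum(a * (a + 1) // 2 - t * (t + 1) // 2 for a in pos if a > t)
--         return s + (B - c) * t
--     else: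
--         r = B - P
--         profit = sum(a * (a + 1) // 2 for a in pos)
--         rest = sorted((a for a in A if a <= 0), reverse=True)
--         return profit + sum(rest[:r])
-- ===== Notes on version B (the rewrite author's own statement) =====
-- stated objective: alternative
-- what changed: Replaces the B-iteration max-heap simulation by a binary search for the largest price threshold with at least B picks above it, summing all picks above the threshold arithmetically with triangular numbers; seats that decay to non-positive prices are handled by one sort of the non-positive seats.
import Mathlib
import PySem

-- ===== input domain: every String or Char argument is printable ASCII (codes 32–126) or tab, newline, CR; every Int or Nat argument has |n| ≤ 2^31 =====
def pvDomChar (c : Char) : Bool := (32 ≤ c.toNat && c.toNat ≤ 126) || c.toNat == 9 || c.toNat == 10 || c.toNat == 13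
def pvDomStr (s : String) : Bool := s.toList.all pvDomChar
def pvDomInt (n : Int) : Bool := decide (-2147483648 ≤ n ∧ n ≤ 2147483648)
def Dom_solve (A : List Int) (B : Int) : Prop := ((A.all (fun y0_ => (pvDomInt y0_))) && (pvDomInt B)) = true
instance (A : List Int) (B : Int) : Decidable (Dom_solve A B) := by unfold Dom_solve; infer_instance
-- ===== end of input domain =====

-- B replaces A's B-iteration max-heap simulation by a binary search for the price
-- threshold plus arithmetic (triangular-number) summation of the picks above it.


-- ===== PORT A =====
-- heapq model: the heap is the list of stored values; heappop yields the minimum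
-- (the only observable of heapq here) and removes one occurrence; heappush adds.
def heapPop (h : List Int) : Option (Int × List Int) :=
  match PySem.List.min? h (fun x => x) with
  | none => none
  | some m => some (m, h.erase m)

-- 'for _ in range(B)': B.toNat iterations; none = IndexError (pop from empty heap)
def solveLoop : Nat → Int → List Int → Option Int
  | 0, profit, _ => some profit
  | Nat.succ k, profit, heap =>
    match heapPop heap with
    | none => none
    | some (mn, h') =>
      let maxSeat := -mn
      solveLoop k (profit + maxSeat)
        (if 0 < maxSeat - 1 then (-(maxSeat - 1)) :: h' else h')

def solve (A : List Int) (B : Int) : Int :=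
  (solveLoop B.toNat 0 (A.map (fun a => -a))).getD 0

-- ===== PORT B =====
def cntGE (pos : List Int) (t : Int) : Int :=
  ((pos.filter (fun a => t ≤ a)).map (fun a => a - t + 1)).sum

def bsearchT (pos : List Int) (Bq lo hi : Int) : Int :=
  if h : lo < hi then
    let mid := PySem.Int.floordiv (lo + hi + 1) 2
    if Bq ≤ cntGE pos mid then bsearchT pos Bq mid hi
    else bsearchT pos Bq lo (mid - 1)
  else lo
termination_by (hi - lo).toNat
decreasing_by
  · have h1 : lo + 1 ≤ PySem.Int.floordiv (lo + hi + 1) 2 :=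
      (PySem.Int.le_floordiv_iff_mul_le (by omega)).mpr (by omega)
    omega
  · have h2 : PySem.Int.floordiv (lo + hi + 1) 2 < hi + 1 :=
      (PySem.Int.floordiv_lt_iff_lt_mul (by omega)).mpr (by omega)
    omega

def solve_alt (A : List Int) (B : Int) : Int :=
  if B ≤ 0 then 0
  else
    let pos := A.filter (fun a => decide (0 < a))
    let P := pos.sum
    if B ≤ P then
      let t := bsearchT pos B 1 ((PySem.List.max? pos (fun x => x)).getD 0)
      let c := ((pos.filter (fun a => decide (t < a))).map (fun a => a - t)).sum
      let s := ((pos.filter (fun a => decide (t < a))).map (fun a =>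
        PySem.Int.floordiv (a * (a + 1)) 2 - PySem.Int.floordiv (t * (t + 1)) 2)).sum
      s + (B - c) * t
    else
      let r := B - P
      let profit := (pos.map (fun a => PySem.Int.floordiv (a * (a + 1)) 2)).sum
      let rest := PySem.List.sorted (A.filter (fun a => decide (a ≤ 0))) (fun x => x) true
      profit + (PySem.List.slice rest none (some r)).sum

-- ===== PRECONDITION & SPEC =====
-- A pops the heap B times; a seat priced a yields max(a,1) pops before vanishing, so
-- A raises IndexError (heappop from []) exactly when B exceeds the total pop supply.
def Pre_solve (A : List Int) (B : Int) : Prop := B ≤ (A.map (fun a => max a 1)).sum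
instance (A : List Int) (B : Int) : Decidable (Pre_solve A B) := by unfold Pre_solve; infer_instance
def pvWitness_solve : List Int × Int := ([3, -1], 2)

def Spec_solve (A : List Int) (B : Int) (out : Int) : Prop := out = solve_alt A B
instance (A : List Int) (B : Int) (out : Int) : Decidable (Spec_solve A B out) := by unfold Spec_solve; infer_instance

-- ===== CLAIM (what is proved, stated in full; the proofs are below) =====
def Claim_equal_solve : Prop := ∀ (A : List Int) (B : Int), Dom_solve A B → Pre_solve A B → Spec_solve A B (solve A B)

-- ===== LEMMAS AND PROOFS =====

-- the multiset of individual pops a seat priced a can deliver: a, a-1, …, 1 (or just a if a ≤ 0)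
def descRange (a : Int) : List Int := PySem.List.pyRange a 0 (-1)

def expandL (m : List Int) : List Int :=
  m.flatMap (fun a => if 0 < a then descRange a else [a])

def sortDesc (l : List Int) : List Int := l.mergeSort (fun x y => decide (y ≤ x))

def topSum (k : Nat) (m : List Int) : Int := ((sortDesc (expandL m)).take k).sum

def triI (x : Int) : Int := PySem.Int.floordiv (x * (x + 1)) 2

-- A's loop on the un-negated seat prices
def greedy : Nat → Int → List Int → Option Int
  | 0, p, _ => some p
  | Nat.succ k, p, m =>
    match PySem.List.max? m (fun x => x) with
    | none => none
    | some x => greedy k (p + x) (if 0 < x - 1 then (x - 1) :: m.erase x else m.erase x)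

theorem min?_map_neg (m : List Int) :
    PySem.List.min? (m.map (fun a => -a)) (fun x => x) =
      (PySem.List.max? m (fun x => x)).map (fun a => -a) := by
  cases hx : PySem.List.max? m (fun x => x) with
  | none =>
    have hm : m = [] := (PySem.List.max?_eq_none_iff m _).mp hx
    subst hm; rfl
  | some x =>
    have hxm : x ∈ m := PySem.List.max?_mem hx
    have hmax := PySem.List.max?_isMax hx
    cases hmn : PySem.List.min? (m.map (fun a => -a)) (fun x => x) with
    | none =>
      have := (PySem.List.min?_eq_none_iff (m.map (fun a => -a)) _).mp hmn
      simp at this; subst this; simp at hxm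
    | some mn =>
      have hmem : mn ∈ m.map (fun a => -a) := PySem.List.min?_mem hmn
      have hmin := PySem.List.min?_isMin hmn
      simp only [List.mem_map] at hmem
      obtain ⟨a, ham, rfl⟩ := hmem
      have h1 : -a ≤ -x := hmin (-x) (List.mem_map_of_mem hxm)
      have h2 : a ≤ x := hmax a ham
      simp only [Option.map_some]
      congr 1; omega

theorem solveLoop_eq_greedy (k : Nat) (p : Int) (m : List Int) :
    solveLoop k p (m.map (fun a => -a)) = greedy k p m := by
  induction k generalizing p m with
  | zero => rfl
  | succ k ih =>
    show (match heapPop (m.map (fun a => -a)) with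
      | none => none
      | some (mn, h') => solveLoop k (p + -mn)
          (if 0 < -mn - 1 then (-(-mn - 1)) :: h' else h')) = _
    unfold heapPop
    rw [min?_map_neg]
    cases hx : PySem.List.max? m (fun x => x) with
    | none => simp [greedy, hx]
    | some x =>
      have hinj : Function.Injective (fun a : Int => -a) := fun a b => by simp
      have herase : (m.map (fun a => -a)).erase (-x) = (m.erase x).map (fun a => -a) :=
        (List.map_erase hinj m).symm
      simp only [Option.map_some, greedy, hx, herase, neg_neg]
      by_cases hx1 : 0 < x - 1
      · rw [if_pos hx1, if_pos hx1]
        have : (-(x - 1)) :: (m.erase x).map (fun a => -a)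
            = ((x - 1) :: m.erase x).map (fun a => -a) := by simp
        rw [this, ih]
      · rw [if_neg hx1, if_neg hx1, ih]

theorem sortDesc_perm (l : List Int) : (sortDesc l).Perm l := List.mergeSort_perm l _

theorem sortDesc_pairwise (l : List Int) : (sortDesc l).Pairwise (fun x y => y ≤ x) := by
  have := List.pairwise_mergeSort (le := fun x y : Int => decide (y ≤ x))
    (fun _ _ _ => by simp; omega) (fun _ _ => by simp; omega) l
  exact this.imp (by simp)

theorem desc_eq_of_perm {l l' : List Int} (h : l.Perm l')
    (h1 : l.Pairwise (fun x y => y ≤ x)) (h2 : l'.Pairwise (fun x y => y ≤ x)) : l = l' :=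
  List.Perm.eq_of_pairwise (fun _ _ _ _ hab hba => le_antisymm hba hab) h1 h2 h

theorem sortDesc_congr_perm {l l' : List Int} (h : l.Perm l') : sortDesc l = sortDesc l' :=
  desc_eq_of_perm ((sortDesc_perm l).trans (h.trans (sortDesc_perm l').symm))
    (sortDesc_pairwise l) (sortDesc_pairwise l')

theorem sortDesc_cons_max {l : List Int} {x : Int} (hx : x ∈ l) (hmax : ∀ y ∈ l, y ≤ x) :
    sortDesc l = x :: sortDesc (l.erase x) := by
  apply desc_eq_of_perm
  · exact (sortDesc_perm l).trans ((List.perm_cons_erase hx).trans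
      (List.Perm.cons x (sortDesc_perm (l.erase x)).symm))
  · exact sortDesc_pairwise l
  · refine List.pairwise_cons.mpr ⟨?_, sortDesc_pairwise _⟩
    intro y hy
    exact hmax y (List.erase_subset ((sortDesc_perm _).mem_iff.mp hy))

theorem descRange_cons {a : Int} (ha : 0 < a) : descRange a = a :: descRange (a - 1) :=
  PySem.List.pyRange_neg_one_cons ha

theorem descRange_nil {a : Int} (ha : a ≤ 0) : descRange a = [] :=
  PySem.List.pyRange_neg_one_eq_nil ha

theorem mem_descRange {a v : Int} (h : v ∈ descRange a) : 1 ≤ v ∧ v ≤ a := by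
  unfold descRange at h; rw [PySem.List.mem_pyRange_neg_one] at h; omega

theorem self_mem_descRange {a : Int} (ha : 0 < a) : a ∈ descRange a := by
  rw [descRange_cons ha]; exact List.mem_cons_self

theorem mem_expandL_le {m : List Int} {v : Int} (h : v ∈ expandL m) : ∃ a ∈ m, v ≤ a := by
  unfold expandL at h
  rw [List.mem_flatMap] at h
  obtain ⟨a, ham, hv⟩ := h
  refine ⟨a, ham, ?_⟩
  by_cases h0 : 0 < a
  · rw [if_pos h0] at hv; exact (mem_descRange hv).2
  · rw [if_neg h0] at hv; simp at hv; omega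

-- one greedy step: pop the max x of m, reinsert x-1 while it stays positive
def stepM (m : List Int) (x : Int) : List Int :=
  if 0 < x - 1 then (x - 1) :: m.erase x else m.erase x

theorem expandL_cons (a : Int) (m : List Int) :
    expandL (a :: m) = (if 0 < a then descRange a else [a]) ++ expandL m := by
  unfold expandL; rw [List.flatMap_cons]

theorem expandL_step_perm {m : List Int} {x : Int} (hx : x ∈ m) :
    (expandL m).Perm (x :: expandL (stepM m x)) := by
  have h1 : (expandL m).Perm (expandL (x :: m.erase x)) :=
    List.Perm.flatMap_right _ (List.perm_cons_erase hx)
  refine h1.trans ?_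
  rw [expandL_cons]
  unfold stepM
  by_cases hx1 : 0 < x - 1
  · have hx0 : 0 < x := by omega
    rw [if_pos hx0, if_pos hx1, descRange_cons hx0, expandL_cons, if_pos hx1,
      List.cons_append]
  · by_cases hx0 : 0 < x
    · have hxe : x = 1 := by omega
      rw [if_pos hx0, if_neg hx1, hxe, descRange_cons (by omega), List.cons_append]
      rw [descRange_nil (by omega : (1:Int) - 1 ≤ 0)]
      simp
    · rw [if_neg hx0, if_neg hx1]; simp

theorem max_mem_expandL {m : List Int} {x : Int} (hx : x ∈ m) :
    x ∈ expandL m := by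
  unfold expandL
  rw [List.mem_flatMap]
  refine ⟨x, hx, ?_⟩
  by_cases h0 : 0 < x
  · rw [if_pos h0]; exact self_mem_descRange h0
  · rw [if_neg h0]; simp

theorem greedy_eq (k : Nat) (p : Int) (m : List Int) (hk : k ≤ (expandL m).length) :
    greedy k p m = some (p + topSum k m) := by
  induction k generalizing p m with
  | zero => simp [greedy, topSum]
  | succ k ih =>
    have hne : m ≠ [] := by
      intro h; subst h; simp [expandL] at hk
    cases hx : PySem.List.max? m (fun x => x) with
    | none => exact absurd ((PySem.List.max?_eq_none_iff m _).mp hx) hne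
    | some x =>
      have hxm : x ∈ m := PySem.List.max?_mem hx
      have hmax : ∀ y ∈ m, y ≤ x := PySem.List.max?_isMax hx
      have hstep : (expandL m).Perm (x :: expandL (stepM m x)) := expandL_step_perm hxm
      have hsort : sortDesc (expandL m) = x :: sortDesc (expandL (stepM m x)) := by
        rw [sortDesc_cons_max (max_mem_expandL hxm)
          (fun v hv => by obtain ⟨a, ham, hva⟩ := mem_expandL_le hv; exact le_trans hva (hmax a ham))]
        congr 1
        apply sortDesc_congr_perm
        have := hstep.erase x
        rw [List.erase_cons_head] at this
        exact this
      have hlen : (expandL m).length = (expandL (stepM m x)).length + 1 := by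
        rw [hstep.length_eq]; simp
      have hk' : k ≤ (expandL (stepM m x)).length := by omega
      simp only [greedy, hx]
      have hst : (if 0 < x - 1 then (x - 1) :: m.erase x else m.erase x) = stepM m x := rfl
      rw [hst, ih (p + x) (stepM m x) hk']
      congr 1
      unfold topSum
      rw [hsort, List.take_succ_cons, List.sum_cons]
      ring

-- ========== B-side lemmas ==========

theorem countP_descRange (t : Int) (ht : 1 ≤ t) : ∀ (n : Nat) (a : Int), a.toNat = n →
    (descRange a).countP (fun v => decide (t ≤ v)) = (a - t + 1).toNat := by
  intro n
  induction n with
  | zero =>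
    intro a h
    rw [descRange_nil (by omega)]
    simp; omega
  | succ n ih =>
    intro a h
    rw [descRange_cons (by omega), List.countP_cons, ih (a - 1) (by omega)]
    by_cases hta : t ≤ a
    · rw [if_pos (by simpa using hta)]; omega
    · rw [if_neg (by simpa using hta)]; omega

theorem cntGE_eq_mapsum (pos : List Int) (t : Int) :
    cntGE pos t = (pos.map (fun a => if t ≤ a then a - t + 1 else 0)).sum := by
  induction pos with
  | nil => rfl
  | cons a l ih =>
    unfold cntGE at *
    rw [List.filter_cons, List.map_cons, List.sum_cons, ← ih]
    by_cases hta : t ≤ a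
    · rw [if_pos (by simpa using hta), if_pos hta, List.map_cons, List.sum_cons]
    · rw [if_neg (by simpa using hta), if_neg hta, zero_add]

theorem cntGE_anti (pos : List Int) {t u : Int} (h : t ≤ u) : cntGE pos u ≤ cntGE pos t := by
  rw [cntGE_eq_mapsum, cntGE_eq_mapsum]
  apply List.sum_le_sum
  intro a _
  by_cases h1 : u ≤ a
  · rw [if_pos h1, if_pos (by omega)]; omega
  · rw [if_neg h1]
    by_cases h2 : t ≤ a
    · rw [if_pos h2]; omega
    · rw [if_neg h2]

theorem cntGE_eq_countP (pos : List Int) (t : Int) (ht : 1 ≤ t) :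
    cntGE pos t = ((expandL pos).countP (fun v => decide (t ≤ v)) : Int) := by
  induction pos with
  | nil => rfl
  | cons a l ih =>
    rw [expandL_cons, List.countP_append]
    unfold cntGE at *
    rw [List.filter_cons]
    by_cases hta : t ≤ a
    · rw [if_pos (by simpa using hta), List.map_cons, List.sum_cons, ih]
      have h0 : 0 < a := by omega
      rw [if_pos h0, countP_descRange t ht a.toNat a rfl]
      omega
    · rw [if_neg (by simpa using hta), ih]
      by_cases h0 : 0 < a
      · rw [if_pos h0, countP_descRange t ht a.toNat a rfl,
          show (a - t + 1).toNat = 0 by omega]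
        simp
      · rw [if_neg h0]
        simp only [List.countP_cons, List.countP_nil]
        rw [if_neg (by simpa using hta)]
        simp

theorem cntGE_one (pos : List Int) (h : ∀ a ∈ pos, 0 < a) : cntGE pos 1 = pos.sum := by
  rw [cntGE_eq_mapsum]
  have : pos.map (fun a => if (1:Int) ≤ a then a - 1 + 1 else 0) = pos.map id := by
    apply List.map_congr_left
    intro a ha
    have := h a ha
    rw [if_pos (by omega)]; simp only [id]; omega
  rw [this, List.map_id]

theorem cntGE_zero (pos : List Int) {u : Int} (h : ∀ a ∈ pos, a < u) : cntGE pos u = 0 := by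
  unfold cntGE
  rw [List.filter_eq_nil_iff.mpr (fun a ha => by simpa using not_le.mpr (h a ha))]
  rfl

theorem bsearchT_spec (pos : List Int) (Bq : Int) :
    ∀ (n : Nat) (lo hi : Int), (hi - lo).toNat = n → lo ≤ hi → Bq ≤ cntGE pos lo →
      (∀ u, hi < u → cntGE pos u < Bq) →
      lo ≤ bsearchT pos Bq lo hi ∧ Bq ≤ cntGE pos (bsearchT pos Bq lo hi) ∧
        ∀ u, bsearchT pos Bq lo hi < u → cntGE pos u < Bq := by
  intro n
  induction n using Nat.strong_induction_on with
  | _ n IH =>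
    intro lo hi hn hlohi hlo hhi
    rw [bsearchT]
    by_cases h : lo < hi
    · rw [dif_pos h]
      have h1 : lo + 1 ≤ PySem.Int.floordiv (lo + hi + 1) 2 :=
        (PySem.Int.le_floordiv_iff_mul_le (by omega)).mpr (by omega)
      have h2 : PySem.Int.floordiv (lo + hi + 1) 2 < hi + 1 :=
        (PySem.Int.floordiv_lt_iff_lt_mul (by omega)).mpr (by omega)
      set mid := PySem.Int.floordiv (lo + hi + 1) 2 with hmid
      by_cases hc : Bq ≤ cntGE pos mid
      · rw [if_pos hc]
        have := IH (hi - mid).toNat (by omega) mid hi rfl (by omega) hc hhi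
        exact ⟨by omega, this.2⟩
      · rw [if_neg hc]
        refine IH (mid - 1 - lo).toNat (by omega) lo (mid - 1) rfl (by omega) hlo ?_
        intro u hu
        calc cntGE pos u ≤ cntGE pos mid := cntGE_anti pos (by omega)
          _ < Bq := not_le.mp hc
    · rw [dif_neg h]
      exact ⟨le_refl lo, hlo, fun u hu => hhi u (by omega)⟩

theorem all_eq_sum {l : List Int} {t : Int} (h : ∀ v ∈ l, v = t) :
    l.sum = (l.length : Int) * t := by
  induction l with
  | nil => simp
  | cons a l ih =>
    rw [List.sum_cons, h a List.mem_cons_self, ih (fun v hv => h v (List.mem_cons_of_mem a hv)),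
      List.length_cons]
    push_cast; ring

theorem sorted_take_ge {t : Int} : ∀ (D : List Int), D.Pairwise (fun x y => y ≤ x) →
    ∀ (j : Nat), j ≤ D.countP (fun v => decide (t ≤ v)) → ∀ v ∈ D.take j, t ≤ v := by
  intro D
  induction D with
  | nil => intro _ j _ v hv; simp at hv
  | cons d D' ih =>
    intro hs j hj v hv
    cases j with
    | zero => simp at hv
    | succ j =>
      have hsD' := (List.pairwise_cons.mp hs).2
      have hd : t ≤ d := by
        by_contra hdt
        have hz : (d :: D').countP (fun v => decide (t ≤ v)) = 0 := by
          rw [List.countP_eq_zero]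
          intro a ha
          rcases List.mem_cons.mp ha with rfl | ha'
          · simpa using hdt
          · have := (List.pairwise_cons.mp hs).1 a ha'
            simp only [decide_eq_true_eq]; omega
        omega
      rw [List.take_succ_cons] at hv
      rcases List.mem_cons.mp hv with rfl | hv'
      · exact hd
      · refine ih hsD' j ?_ v hv'
        rw [List.countP_cons, if_pos (by simpa using hd)] at hj
        omega

theorem filter_eq_takeWhile_desc {t : Int} : ∀ (D : List Int), D.Pairwise (fun x y => y ≤ x) →
    D.filter (fun v => decide (t < v)) = D.takeWhile (fun v => decide (t < v)) := by
  intro D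
  induction D with
  | nil => intro _; rfl
  | cons d D' ih =>
    intro hs
    rw [List.filter_cons, List.takeWhile_cons]
    by_cases hd : t < d
    · rw [if_pos (by simpa using hd), if_pos (by simpa using hd),
        ih (List.pairwise_cons.mp hs).2]
    · rw [if_neg (by simpa using hd), if_neg (by simpa using hd)]
      rw [List.filter_eq_nil_iff]
      intro a ha
      have := (List.pairwise_cons.mp hs).1 a ha
      simp only [decide_eq_true_eq]; omega

theorem take_sum_sorted_desc (D : List Int) (hs : D.Pairwise (fun x y => y ≤ x)) (t : Int)
    (b : Nat) (hc : D.countP (fun v => decide (t < v)) ≤ b)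
    (hb : b ≤ D.countP (fun v => decide (t ≤ v))) :
    (D.take b).sum = (D.filter (fun v => decide (t < v))).sum +
      ((b : Int) - (D.countP (fun v => decide (t < v)) : Int)) * t := by
  set p : Int → Bool := fun v => decide (t < v) with hp
  set q : Int → Bool := fun v => decide (t ≤ v) with hq
  set F := D.takeWhile p with hF
  set R := D.dropWhile p with hR
  have hFf : D.filter p = F := filter_eq_takeWhile_desc D hs
  have hc' : D.countP p = F.length := by rw [List.countP_eq_length_filter, hFf]
  have hD : D = F ++ R := (List.takeWhile_append_dropWhile).symm
  have hFlen : F.length ≤ b := by omega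
  have hRsorted : R.Pairwise (fun x y => y ≤ x) := hs.sublist (List.dropWhile_sublist p)
  have hFq : F.countP q = F.length := by
    rw [List.countP_eq_length]
    intro a ha
    have := List.mem_takeWhile_imp ha
    simp only [hp, hq, decide_eq_true_eq] at this ⊢
    omega
  have hRq : b - F.length ≤ R.countP q := by
    have : D.countP q = F.countP q + R.countP q := by rw [hD, List.countP_append]
    omega
  have hRp : R.countP p = 0 := by
    have : D.countP p = F.countP p + R.countP p := by rw [hD, List.countP_append]
    have hFp : F.countP p = F.length := by
      rw [List.countP_eq_length]
      intro a ha
      exact List.mem_takeWhile_imp ha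
    omega
  have htake : D.take b = F ++ R.take (b - F.length) := by
    rw [hD, List.take_append, List.take_of_length_le hFlen]
  have hall : ∀ v ∈ R.take (b - F.length), v = t := by
    intro v hv
    have h1 : t ≤ v := sorted_take_ge R hRsorted (b - F.length) hRq v hv
    have h2 : ¬ (t < v) := by
      have hvR : v ∈ R := List.mem_of_mem_take hv
      have := List.countP_eq_zero.mp hRp v hvR
      simpa [hp] using this
    omega
  have hRlen : b - F.length ≤ R.length := by
    have h1 : D.countP q ≤ D.length := List.countP_le_length
    have h2 : D.length = F.length + R.length := by rw [hD, List.length_append]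
    omega
  rw [htake, List.sum_append, hFf, all_eq_sum hall, List.length_take, hc']
  have : min (b - F.length) R.length = b - F.length := by omega
  rw [this]
  push_cast [hFlen]
  ring

-- ========== structure and triangular-sum lemmas ==========

theorem triI_succ (a : Int) : triI a = triI (a - 1) + a := by
  unfold triI
  rw [PySem.Int.floordiv_eq_ediv_of_pos (by omega), PySem.Int.floordiv_eq_ediv_of_pos (by omega)]
  have h : a * (a + 1) = (a - 1) * a + a * 2 := by ring
  rw [h, Int.add_mul_ediv_right _ _ (by omega : (2:Int) ≠ 0)]
  have h2 : a - 1 + 1 = a := by ring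
  rw [h2]

theorem triI_zero : triI 0 = 0 := by decide

theorem descRange_filter_sum (t : Int) (h0 : 0 ≤ t) :
    ∀ (n : Nat) (a : Int), (a - t).toNat = n → t ≤ a →
      ((descRange a).filter (fun v => decide (t < v))).sum = triI a - triI t := by
  intro n
  induction n with
  | zero =>
    intro a hn hta
    have : a = t := by omega
    subst this
    rw [List.filter_eq_nil_iff.mpr ?_]
    · simp
    · intro v hv
      have := mem_descRange hv
      simp only [decide_eq_true_eq]; omega
  | succ n ih =>
    intro a hn hta
    have ha : 0 < a := by omega
    rw [descRange_cons ha, List.filter_cons, if_pos (by simp; omega), List.sum_cons,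
      ih (a - 1) (by omega) (by omega), triI_succ a]
    ring

theorem descRange_sum (a : Int) : (descRange a).sum = if 0 < a then triI a else 0 := by
  by_cases ha : 0 < a
  · rw [if_pos ha]
    have := descRange_filter_sum 0 (le_refl 0) a.toNat a (by omega) (by omega)
    rw [triI_zero, sub_zero] at this
    rw [← this, List.filter_eq_self.mpr]
    intro v hv
    have := mem_descRange hv
    simp only [decide_eq_true_eq]; omega
  · rw [if_neg ha, descRange_nil (by omega)]; rfl

theorem expandL_filter_sum (t : Int) (ht : 0 ≤ t) (l : List Int) (hpos : ∀ a ∈ l, 0 < a) :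
    ((expandL l).filter (fun v => decide (t < v))).sum =
      ((l.filter (fun a => decide (t < a))).map (fun a => triI a - triI t)).sum := by
  induction l with
  | nil => rfl
  | cons a l ih =>
    have ha : 0 < a := hpos a List.mem_cons_self
    have ih' := ih (fun x hx => hpos x (List.mem_cons_of_mem a hx))
    rw [expandL_cons, if_pos ha, List.filter_append, List.sum_append, ih', List.filter_cons]
    by_cases hta : t < a
    · rw [if_pos (by simpa using hta), List.map_cons, List.sum_cons,
        descRange_filter_sum t ht (a - t).toNat a rfl (by omega)]
    · rw [if_neg (by simpa using hta)]
      rw [List.filter_eq_nil_iff.mpr ?_]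
      · simp
      · intro v hv
        have := mem_descRange hv
        simp only [decide_eq_true_eq]; omega

theorem expandL_pos_length (l : List Int) (h : ∀ a ∈ l, 0 < a) :
    ((expandL l).length : Int) = l.sum := by
  induction l with
  | nil => rfl
  | cons a l ih =>
    have ha : 0 < a := h a List.mem_cons_self
    rw [expandL_cons, if_pos ha, List.length_append, List.sum_cons,
      ← ih (fun x hx => h x (List.mem_cons_of_mem a hx))]
    unfold descRange
    rw [PySem.List.length_pyRange_neg_one]
    push_cast; omega

theorem expandL_cap (l : List Int) :
    ((expandL l).length : Int) = (l.map (fun a => max a 1)).sum := by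
  induction l with
  | nil => rfl
  | cons a l ih =>
    rw [expandL_cons, List.length_append, List.map_cons, List.sum_cons, ← ih]
    by_cases ha : 0 < a
    · rw [if_pos ha, max_eq_left (by omega : (1:Int) ≤ a)]
      unfold descRange
      rw [PySem.List.length_pyRange_neg_one]
      push_cast; omega
    · rw [if_neg ha, max_eq_right (by omega : a ≤ (1:Int))]
      simp

theorem expandL_sum_tri (l : List Int) (h : ∀ a ∈ l, 0 < a) :
    (expandL l).sum = (l.map (fun a => triI a)).sum := by
  induction l with
  | nil => rfl
  | cons a l ih =>
    have ha : 0 < a := h a List.mem_cons_self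
    rw [expandL_cons, if_pos ha, List.sum_append, List.map_cons, List.sum_cons,
      ih (fun x hx => h x (List.mem_cons_of_mem a hx)), descRange_sum, if_pos ha]

theorem expandL_nonpos_id (l : List Int) (h : ∀ a ∈ l, ¬ 0 < a) : expandL l = l := by
  induction l with
  | nil => rfl
  | cons a l ih =>
    rw [expandL_cons, if_neg (h a List.mem_cons_self),
      ih (fun x hx => h x (List.mem_cons_of_mem a hx)), List.singleton_append]

theorem one_le_mem_expandL_pos {A : List Int} {v : Int}
    (hv : v ∈ expandL (A.filter (fun a => decide (0 < a)))) : 1 ≤ v := by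
  unfold expandL at hv
  rw [List.mem_flatMap] at hv
  obtain ⟨a, ha, hv⟩ := hv
  have ha' : 0 < a := by simpa using (List.mem_filter.mp ha).2
  rw [if_pos ha'] at hv
  exact (mem_descRange hv).1

theorem sortDesc_split (A : List Int) :
    sortDesc (expandL A) = sortDesc (expandL (A.filter (fun a => decide (0 < a)))) ++
      sortDesc (A.filter (fun a => !decide (0 < a))) := by
  set pos := A.filter (fun a => decide (0 < a)) with hpos
  set npos := A.filter (fun a => !decide (0 < a)) with hnpos
  apply desc_eq_of_perm
  · have h1 : (expandL A).Perm (expandL (pos ++ npos)) :=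
      List.Perm.flatMap_right _ (List.filter_append_perm _ A).symm
    have h2 : expandL (pos ++ npos) = expandL pos ++ expandL npos := by
      unfold expandL; rw [List.flatMap_append]
    have h3 : expandL npos = npos :=
      expandL_nonpos_id npos (fun a ha => by simpa using (List.mem_filter.mp ha).2)
    refine (sortDesc_perm _).trans (h1.trans ?_)
    rw [h2, h3]
    exact List.Perm.append (sortDesc_perm _).symm (sortDesc_perm _).symm
  · exact sortDesc_pairwise _
  · rw [List.pairwise_append]
    refine ⟨sortDesc_pairwise _, sortDesc_pairwise _, ?_⟩
    intro x hx y hy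
    have hx1 : 1 ≤ x := one_le_mem_expandL_pos ((sortDesc_perm _).mem_iff.mp hx)
    have hy0 : ¬ 0 < y := by
      have := (List.mem_filter.mp ((sortDesc_perm _).mem_iff.mp hy)).2
      simpa using this
    omega

theorem sum_nonneg_of_pos (l : List Int) (h : ∀ a ∈ l, 0 < a) : 0 ≤ l.sum := by
  induction l with
  | nil => simp
  | cons a l ih =>
    have := h a List.mem_cons_self
    have := ih (fun x hx => h x (List.mem_cons_of_mem a hx))
    rw [List.sum_cons]; omega

theorem solve_alt_eq_topSum (A : List Int) (B : Int) (h0 : 0 < B) :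
    solve_alt A B = topSum B.toNat A := by
  simp only [solve_alt]
  rw [if_neg (by omega)]
  have hsplit := sortDesc_split A
  have hrestf : A.filter (fun a => decide (a ≤ 0)) = A.filter (fun a => !decide (0 < a)) := by
    apply List.filter_congr
    intro a _
    by_cases h : 0 < a
    · simp [h]
    · simp [h]
      omega
  rw [hrestf]
  generalize hnposdef : A.filter (fun a => !decide (0 < a)) = npos at hsplit ⊢
  generalize hposdef : A.filter (fun a => decide (0 < a)) = pos at hsplit ⊢
  have hposmem : ∀ a ∈ pos, 0 < a := by
    rw [← hposdef]; exact fun a ha => by simpa using (List.mem_filter.mp ha).2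
  have hPnn : 0 ≤ pos.sum := sum_nonneg_of_pos pos hposmem
  have hlenpos : ((sortDesc (expandL pos)).length : Int) = pos.sum := by
    rw [(sortDesc_perm _).length_eq]; exact expandL_pos_length pos hposmem
  by_cases hBP : B ≤ pos.sum
  · rw [if_pos hBP]
    -- the binary-search branch
    have hposne : pos ≠ [] := by
      intro h; rw [h] at hBP; simp at hBP; omega
    cases hM : PySem.List.max? pos (fun x => x) with
    | none => exact absurd ((PySem.List.max?_eq_none_iff pos _).mp hM) hposne
    | some M =>
      have hM1 : 1 ≤ M := hposmem M (PySem.List.max?_mem hM)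
      have hMmax := PySem.List.max?_isMax hM
      have hbs := bsearchT_spec pos B (M - 1).toNat 1 M rfl (by omega)
        (by rw [cntGE_one pos hposmem]; exact hBP)
        (by
          intro u hu
          rw [cntGE_zero pos (fun a ha => by have h2 : a ≤ M := hMmax a ha; omega)]
          omega)
      simp only [Option.getD_some]
      have ht1 := hbs.1
      have htB := hbs.2.1
      have htU := hbs.2.2
      have htU' : cntGE pos (bsearchT pos B 1 M + 1) < B := htU _ (by omega)
      have hcntt : cntGE pos (bsearchT pos B 1 M) =
          ((expandL pos).countP (fun v => decide (bsearchT pos B 1 M ≤ v)) : Int) :=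
        cntGE_eq_countP pos _ (by omega)
      have hcntt1 : cntGE pos (bsearchT pos B 1 M + 1) =
          ((expandL pos).countP (fun v => decide (bsearchT pos B 1 M + 1 ≤ v)) : Int) :=
        cntGE_eq_countP pos _ (by omega)
      have hcongr : (expandL pos).countP (fun v => decide (bsearchT pos B 1 M + 1 ≤ v)) =
          (expandL pos).countP (fun v => decide (bsearchT pos B 1 M < v)) :=
        List.countP_congr (fun a _ => by simp only [decide_eq_true_eq]; omega)
      -- countP over the sorted list equals countP over expandL pos
      have hcP : ∀ pp : Int → Bool, (sortDesc (expandL pos)).countP pp = (expandL pos).countP pp :=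
        fun pp => List.Perm.countP_congr (sortDesc_perm _) (fun x _ => rfl)
      have hble : B.toNat ≤ (sortDesc (expandL pos)).length := by omega
      have htop : topSum B.toNat A = ((sortDesc (expandL pos)).take B.toNat).sum := by
        unfold topSum
        rw [hsplit, List.take_append, Nat.sub_eq_zero_of_le hble, List.take_zero,
          List.append_nil]
      rw [htop, take_sum_sorted_desc (sortDesc (expandL pos)) (sortDesc_pairwise _)
        (bsearchT pos B 1 M) B.toNat (by rw [hcP]; omega) (by rw [hcP]; omega)]
      have hfs : ((sortDesc (expandL pos)).filter (fun v => decide (bsearchT pos B 1 M < v))).sum =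
          ((expandL pos).filter (fun v => decide (bsearchT pos B 1 M < v))).sum :=
        (List.Perm.filter _ (sortDesc_perm _)).sum_eq
      rw [hfs, expandL_filter_sum (bsearchT pos B 1 M) (by omega) pos hposmem]
      have hc : ((pos.filter (fun a => decide (bsearchT pos B 1 M < a))).map
            (fun a => a - bsearchT pos B 1 M)).sum = cntGE pos (bsearchT pos B 1 M + 1) := by
        unfold cntGE
        rw [List.filter_congr (fun a _ => by simp only [decide_eq_decide]; omega :
          ∀ a ∈ pos, decide (bsearchT pos B 1 M < a) = decide (bsearchT pos B 1 M + 1 ≤ a))]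
        apply congrArg
        apply List.map_congr_left
        intro a _; ring
      have hBt : ((B.toNat : Int)) = B := by omega
      have hchain : ((pos.filter (fun a => decide (bsearchT pos B 1 M < a))).map
            (fun a => a - bsearchT pos B 1 M)).sum =
          ((List.countP (fun v => decide (bsearchT pos B 1 M < v))
            (sortDesc (expandL pos)) : Nat) : Int) := by
        rw [hc, hcntt1]
        push_cast [hcongr, hcP]
        rfl
      rw [hBt]
      congr 1
      exact congrArg (fun z => (B - z) * bsearchT pos B 1 M) hchain
  · rw [if_neg hBP]
    -- the sell-everything-positive branch
    have hrest : PySem.List.sorted npos (fun x => x) true = sortDesc npos :=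
      desc_eq_of_perm ((PySem.List.sorted_perm npos _ true).trans (sortDesc_perm npos).symm)
        (PySem.List.sorted_pairwise_rev npos _) (sortDesc_pairwise _)
    rw [hrest, PySem.List.slice_to _ (by omega : (0:Int) ≤ B - pos.sum)]
    have hble : (sortDesc (expandL pos)).length ≤ B.toNat := by omega
    have htop : topSum B.toNat A = (sortDesc (expandL pos)).sum +
        ((sortDesc npos).take (B.toNat - (sortDesc (expandL pos)).length)).sum := by
      unfold topSum
      rw [hsplit, List.take_append, List.take_of_length_le hble, List.sum_append]
    rw [htop]
    have h1 : (sortDesc (expandL pos)).sum =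
        (pos.map (fun a => PySem.Int.floordiv (a * (a + 1)) 2)).sum := by
      rw [(sortDesc_perm _).sum_eq]; exact expandL_sum_tri pos hposmem
    have h2 : (B - pos.sum).toNat = B.toNat - (sortDesc (expandL pos)).length := by omega
    rw [← h1, h2]

-- ===== VERDICT (by name: the statement is the Claim_ definition above) =====
theorem solve_spec : Claim_equal_solve := by
  intro A B _ hpre
  unfold Spec_solve
  unfold Pre_solve at hpre
  have hcap : B ≤ ((expandL A).length : Int) := by rw [expandL_cap]; exact hpre
  show solve A B = solve_alt A B
  unfold solve
  rw [solveLoop_eq_greedy B.toNat 0 A]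
  by_cases h0 : B ≤ 0
  · have hz : B.toNat = 0 := by omega
    have ha : solve_alt A B = 0 := by unfold solve_alt; rw [if_pos h0]
    rw [hz, ha]
    rfl
  · have hk : B.toNat ≤ (expandL A).length := by omega
    rw [greedy_eq B.toNat 0 A hk, solve_alt_eq_topSum A B (by omega)]
    simp
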